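-- pv_equiv track=rewrite | github.com/nbryn/image-captioning | src/data_loader.py | sort_by_questions_occurences
-- ===== SOURCE A (Python) =====
-- def sort_by_questions_occurences(annotations: list[(str, str)]):
--     """
--     Sort questions by occurences in ascending order.
--     """
--     # Group by question
--     question_dict = {}
--     for context, question in annotations:
--         if question not in question_dict:
--             question_dict[question] = []
--         question_dict[question].append(context)
--
--     # sort by question length (shortest first)
--     question_dict = {k: v for k, v in sorted(
--         question_dict.items(), key=lambda item: len(item[1]))}
--
--     # Convert to list of tuples
--     question_list = []
--     for question, contexts in question_dict.items():
--         for context in contexts: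
--             question_list.append((context, question))
--
--     return question_list
-- ===== SOURCE B (Python) =====
-- def sort_by_questions_occurences(annotations: list[(str, str)]):
--     """
--     Sort questions by occurences in ascending order (stable one-pass index + flat sort).
--     """
--     count = {}
--     first = {}
--     for i, (context, question) in enumerate(annotations):
--         count[question] = count.get(question, 0) + 1
--         if question not in first:
--             first[question] = i
--     return sorted(annotations, key=lambda ann: (count[ann[1]], first[ann[1]]))
-- ===== Notes on version B (the rewrite author's own statement) =====
-- stated objective: simpler
-- what changed: B replaces A's dict-of-lists grouping, sort of the grouped items by length, dict rebuild and nested flatten loops by one counting pass (count and first-seen index per question) followed by a single stable sort of the flat annotation list keyed by (count, first index).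
import Mathlib
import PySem

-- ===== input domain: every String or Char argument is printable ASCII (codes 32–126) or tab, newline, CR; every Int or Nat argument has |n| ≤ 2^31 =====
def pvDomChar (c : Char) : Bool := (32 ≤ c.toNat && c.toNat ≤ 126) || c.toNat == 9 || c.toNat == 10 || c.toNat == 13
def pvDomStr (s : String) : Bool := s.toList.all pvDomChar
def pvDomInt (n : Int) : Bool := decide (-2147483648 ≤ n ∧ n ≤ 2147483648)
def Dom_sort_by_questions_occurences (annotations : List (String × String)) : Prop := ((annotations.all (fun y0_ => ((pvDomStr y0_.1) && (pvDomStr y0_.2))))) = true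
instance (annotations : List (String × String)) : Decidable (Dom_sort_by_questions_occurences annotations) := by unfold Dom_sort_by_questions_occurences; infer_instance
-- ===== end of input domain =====

-- B replaces A's group-sort-flatten (dict of per-question lists, sorted by length, re-flattened)
-- by one counting pass plus a single stable sort of the flat list on the key (count, first index);
-- objective: simpler (one sort over the input instead of dict grouping, dict rebuilding and nested flattening).

-- ===== PORT A =====
def sort_by_questions_occurences (annotations : List (String × String)) : List (String × String) :=
  -- question_dict: group contexts by question (insertion = first-occurrence order)
  let question_dict : PySem.Dict String (List String) :=
    annotations.foldl (fun d p =>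
      let d := if d.contains p.2 then d else d.insert p.2 []
      d.modify p.2 [] (fun v => v ++ [p.1])) PySem.Dict.empty
  -- dict comprehension over items sorted by len(item[1])
  let question_dict2 : PySem.Dict String (List String) :=
    (PySem.List.sorted question_dict.items (fun item => PySem.List.len item.2) false).foldl
      (fun d p => d.insert p.1 p.2) PySem.Dict.empty
  -- nested loops appending (context, question)
  question_dict2.items.foldl (fun acc p => p.2.foldl (fun acc c => acc ++ [(c, p.1)]) acc) []

-- ===== PORT B =====
def sort_by_questions_occurences_alt (annotations : List (String × String)) : List (String × String) :=
  -- one pass: count[q] = count.get(q,0)+1; first[q] = i on first sight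
  let st := (PySem.List.enumerate annotations).foldl
    (fun (st : PySem.Dict String Int × PySem.Dict String Int) ip =>
      (st.1.insert ip.2.2 (st.1.getD ip.2.2 0 + 1),
       if st.2.contains ip.2.2 then st.2 else st.2.insert ip.2.2 ip.1))
    (PySem.Dict.empty, PySem.Dict.empty)
  -- sorted(annotations, key=lambda ann: (count[ann[1]], first[ann[1]]))
  PySem.List.sorted2 annotations (fun p => st.1.getD p.2 0) (fun p => st.2.getD p.2 0) false

-- ===== PRECONDITION & SPEC =====
def Spec_sort_by_questions_occurences (annotations : List (String × String)) (out : List (String × String)) : Prop := out = sort_by_questions_occurences_alt annotations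
instance (annotations : List (String × String)) (out : List (String × String)) : Decidable (Spec_sort_by_questions_occurences annotations out) := by unfold Spec_sort_by_questions_occurences; infer_instance

-- ===== CLAIM (what is proved, stated in full; the proofs are below) =====
def Claim_equal_sort_by_questions_occurences : Prop := ∀ (annotations : List (String × String)), Dom_sort_by_questions_occurences annotations → Spec_sort_by_questions_occurences annotations (sort_by_questions_occurences annotations)

-- ===== LEMMAS AND PROOFS =====

-- Abbreviations for the common quantities of both programs (proof-only helpers).
def pvCtx (ann : List (String × String)) (q : String) : List String :=
  (ann.filter (fun p => p.2 == q)).map (fun p => p.1)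

def pvGrp (ann : List (String × String)) (q : String) : List (String × String) :=
  ann.filter (fun p => p.2 == q)

def pvCnt (ann : List (String × String)) (q : String) : Int :=
  ((ann.map (fun p => p.2)).count q : Int)

def pvFidx (ann : List (String × String)) (q : String) : Int :=
  (((PySem.List.index? (ann.map (fun p => p.2)) q).getD 0 : Nat) : Int)

def pvQs (ann : List (String × String)) : List String :=
  PySem.Set.ofList (ann.map (fun p => p.2))

def pvKey (ann : List (String × String)) (p : String × String) : Lex (Int × Int) :=
  toLex (pvCnt ann p.2, pvFidx ann p.2)

def pvT (ann : List (String × String)) : List (String × String) :=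
  (PySem.List.sorted (pvQs ann) (fun q => pvCnt ann q) false).flatMap (pvGrp ann)

-- insertBy splits the list at the first element y with 'before x y'.
theorem pv_insertBy_split {α : Type} (before : α → α → Bool) (x : α) (l : List α) :
    PySem.List.insertBy before x l
      = l.takeWhile (fun y => !before x y) ++ x :: l.dropWhile (fun y => !before x y) := by
  induction l with
  | nil => simp [PySem.List.insertBy]
  | cons a l ih =>
    by_cases h : before x a
    · simp [PySem.List.insertBy, h]
    · simp [PySem.List.insertBy, h, ih]

-- sorted of a mapped list is the map of sorted with the composed key.
theorem pv_sorted_map {β α κ : Type} [LT κ] [DecidableLT κ] (g : β → α) (key : α → κ) (xs : List β) :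
    PySem.List.sorted (xs.map g) key false
      = (PySem.List.sorted xs (fun b => key (g b)) false).map g := by
  rw [PySem.List.sorted_eq_foldl_insertBy, PySem.List.sorted_eq_foldl_insertBy, List.foldl_map]
  have hins : ∀ (b : β) (l : List β),
      PySem.List.insertBy (fun a b => decide (key a < key b)) (g b) (l.map g)
        = (PySem.List.insertBy (fun a b => decide (key (g a) < key (g b))) b l).map g := by
    intro b l
    induction l with
    | nil => simp [PySem.List.insertBy]
    | cons a l ih =>
      by_cases h : decide (key (g b) < key (g a)) = true
      · simp [PySem.List.insertBy, h]
      · simp only [Bool.not_eq_true] at h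
        simp [PySem.List.insertBy, h, ih]
  have haux : ∀ (l : List β) (acc : List β),
      l.foldl (fun acc b => PySem.List.insertBy (fun a b => decide (key a < key b)) (g b) acc) (acc.map g)
        = (l.foldl (fun acc b => PySem.List.insertBy (fun a b => decide (key (g a) < key (g b))) b acc) acc).map g := by
    intro l
    induction l with
    | nil => intro acc; rfl
    | cons b l ih => intro acc; simp only [List.foldl_cons, hins, ih]
  simpa using haux xs []

-- every element past the insertion point of x in a key-sorted list has key > key x
theorem pv_dropWhile_gt {α κ : Type} [LinearOrder κ] (key : α → κ) (x : α) (l : List α)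
    (h : l.Pairwise (fun a b => key a ≤ key b)) :
    ∀ y ∈ l.dropWhile (fun y => !decide (key x < key y)), key x < key y := by
  induction l with
  | nil => simp
  | cons a l ih =>
    rcases List.pairwise_cons.1 h with ⟨ha, hl⟩
    by_cases hx : key x < key a
    · rw [List.dropWhile_cons_of_neg (by simp [hx])]
      intro y hy
      rcases List.mem_cons.1 hy with rfl | hy
      · exact hx
      · exact lt_of_lt_of_le hx (ha y hy)
    · rw [List.dropWhile_cons_of_pos (by simp [hx])]
      exact ih hl

-- STABILITY of PySem's sort: per-key filters are preserved.
theorem pv_sorted_filter {α κ : Type} [LinearOrder κ] (key : α → κ) (xs : List α) (k : κ) :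
    (PySem.List.sorted xs key false).filter (fun x => decide (key x = k))
      = xs.filter (fun x => decide (key x = k)) := by
  induction xs using List.reverseRecOn with
  | nil => rfl
  | append_singleton xs x ih =>
    have hs : (PySem.List.sorted xs key false).Pairwise (fun a b => key a ≤ key b) :=
      PySem.List.sorted_pairwise xs key
    rw [PySem.List.sorted_eq_foldl_insertBy, List.foldl_append, List.foldl_cons, List.foldl_nil,
      ← PySem.List.sorted_eq_foldl_insertBy, pv_insertBy_split]
    set l := PySem.List.sorted xs key false with hl
    rw [List.filter_append, List.filter_cons]
    by_cases hk : key x = k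
    · have h2 : (l.dropWhile (fun y => !decide (key x < key y))).filter
          (fun y => decide (key y = k)) = [] := by
        rw [List.filter_eq_nil_iff]
        intro y hy
        have := pv_dropWhile_gt key x l hs y hy
        simp only [decide_eq_true_eq]
        exact fun h => absurd (hk ▸ h) (ne_of_gt this)
      have h1 : (l.takeWhile (fun y => !decide (key x < key y))).filter
            (fun y => decide (key y = k))
          = l.filter (fun y => decide (key y = k)) := by
        conv_rhs => rw [← List.takeWhile_append_dropWhile
          (p := fun y => !decide (key x < key y)) (l := l)]
        rw [List.filter_append, h2, List.append_nil]
      rw [h1, h2, ih, List.filter_append, List.filter_cons]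
      simp [hk]
    · have hx : (decide (key x = k)) = false := by simp [hk]
      rw [hx]
      simp only [Bool.false_eq_true, if_false]
      rw [← List.filter_append, List.takeWhile_append_dropWhile, ih, List.filter_append,
        List.filter_cons, hx]
      simp

-- STABILITY, pairwise form: a strictly increasing secondary key stays strictly increasing on ties.
theorem pv_sorted_pairwise_sec {α κ μ : Type} [LinearOrder κ] [LinearOrder μ]
    (key : α → κ) (sec : α → μ) (xs : List α)
    (h : xs.Pairwise (fun a b => sec a < sec b)) :
    (PySem.List.sorted xs key false).Pairwise
      (fun a b => key a < key b ∨ (key a = key b ∧ sec a < sec b)) := by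
  induction xs using List.reverseRecOn with
  | nil => simp [PySem.List.sorted]
  | append_singleton xs x ih =>
    rcases List.pairwise_append.1 h with ⟨hxs, -, hcross⟩
    have ih' := ih hxs
    have hs : (PySem.List.sorted xs key false).Pairwise (fun a b => key a ≤ key b) :=
      PySem.List.sorted_pairwise xs key
    rw [PySem.List.sorted_eq_foldl_insertBy, List.foldl_append, List.foldl_cons, List.foldl_nil,
      ← PySem.List.sorted_eq_foldl_insertBy, pv_insertBy_split]
    set l := PySem.List.sorted xs key false with hl
    have hsplit : l.takeWhile (fun y => !decide (key x < key y))
        ++ l.dropWhile (fun y => !decide (key x < key y)) = l :=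
      List.takeWhile_append_dropWhile
    rcases List.pairwise_append.1 (show (l.takeWhile (fun y => !decide (key x < key y))
        ++ l.dropWhile (fun y => !decide (key x < key y))).Pairwise
          (fun a b => key a < key b ∨ (key a = key b ∧ sec a < sec b)) by rw [hsplit]; exact ih')
      with ⟨h1, h2, h12⟩
    have hmem : ∀ y ∈ l, y ∈ xs := fun y hy => (PySem.List.mem_sorted xs key false y).1 hy
    have hsecx : ∀ y ∈ l, sec y < sec x := fun y hy => hcross y (hmem y hy) x (List.mem_singleton_self x)
    rw [List.pairwise_append]
    refine ⟨h1, ?_, ?_⟩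
    · rw [List.pairwise_cons]
      refine ⟨?_, h2⟩
      intro z hz
      exact Or.inl (pv_dropWhile_gt key x l hs z hz)
    · intro a ha b hb
      rcases List.mem_cons.1 hb with rfl | hb
      · have hpa := List.mem_takeWhile_imp ha
        simp only [Bool.not_eq_eq_eq_not, Bool.not_true, decide_eq_false_iff_not, not_lt] at hpa
        have hax : sec a < sec b :=
          hsecx a ((List.takeWhile_sublist _).mem ha)
        rcases lt_or_eq_of_le hpa with hlt | heq
        · exact Or.inl hlt
        · exact Or.inr ⟨heq, hax⟩
      · exact h12 a ha b hb

-- UNIQUENESS of the stable order: two key-nondecreasing lists with identical per-key filters are equal.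
theorem pv_stable_unique {α κ : Type} [LinearOrder κ] (key : α → κ) :
    ∀ (ys zs : List α), ys.Pairwise (fun a b => key a ≤ key b) →
      zs.Pairwise (fun a b => key a ≤ key b) →
      (∀ k, ys.filter (fun x => decide (key x = k)) = zs.filter (fun x => decide (key x = k))) →
      ys = zs := by
  intro ys
  induction ys with
  | nil =>
    intro zs _ _ h3
    cases zs with
    | nil => rfl
    | cons z zs' =>
      have := h3 (key z)
      rw [List.filter_cons] at this
      simp at this
  | cons y ys' ih =>
    intro zs hys hzs h3
    cases zs with
    | nil =>
      have := h3 (key y)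
      rw [List.filter_cons] at this
      simp at this
    | cons z zs' =>
      rcases List.pairwise_cons.1 hys with ⟨hy, hys'⟩
      rcases List.pairwise_cons.1 hzs with ⟨hz, hzs'⟩
      have hkey : key y = key z := by
        rcases lt_trichotomy (key y) (key z) with hlt | heq | hgt
        · exfalso
          have := h3 (key y)
          rw [List.filter_cons, List.filter_cons] at this
          have hzne : (decide (key z = key y)) = false := by
            simp [ne_of_gt hlt]
          have hnil : zs'.filter (fun x => decide (key x = key y)) = [] := by
            rw [List.filter_eq_nil_iff]
            intro w hw
            simp only [decide_eq_true_eq]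
            exact fun hc => absurd (hc ▸ hz w hw) (not_le_of_gt hlt)
          rw [hzne, hnil] at this
          simp at this
        · exact heq
        · exfalso
          have := h3 (key z)
          rw [List.filter_cons, List.filter_cons] at this
          have hyne : (decide (key y = key z)) = false := by
            simp [ne_of_gt hgt]
          have hnil : ys'.filter (fun x => decide (key x = key z)) = [] := by
            rw [List.filter_eq_nil_iff]
            intro w hw
            simp only [decide_eq_true_eq]
            exact fun hc => absurd (hc ▸ hy w hw) (not_le_of_gt hgt)
          rw [hyne, hnil] at this
          simp at this
      have hhead := h3 (key y)
      rw [List.filter_cons, List.filter_cons] at hhead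
      simp only [decide_eq_true_eq, hkey] at hhead
      have hyz : y = z := (List.cons.injEq _ _ _ _ ▸ hhead).1
      have htail : ys'.filter (fun x => decide (key x = key z)) = zs'.filter (fun x => decide (key x = key z)) :=
        (List.cons.injEq _ _ _ _ ▸ hhead).2
      refine hyz ▸ congrArg (y :: ·) (ih zs' hys' hzs' ?_)
      intro k
      by_cases hk : k = key z
      · rw [hk]; exact htail
      · have := h3 k
        rw [List.filter_cons, List.filter_cons] at this
        have h1 : (decide (key y = k)) = false := by simp [hkey, Ne.symm hk]
        have h2 : (decide (key z = k)) = false := by simp [Ne.symm hk]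
        rwa [h1, h2, if_neg (by simp), if_neg (by simp)] at this

-- sorted2 is sorted with the lexicographic key.
theorem pv_sorted2_eq_lex {α κ₁ κ₂ : Type} [LinearOrder κ₁] [LinearOrder κ₂]
    (xs : List α) (k1 : α → κ₁) (k2 : α → κ₂) :
    PySem.List.sorted2 xs k1 k2 false
      = PySem.List.sorted xs (fun x => (toLex (k1 x, k2 x) : Lex (κ₁ × κ₂))) false := by
  simp only [PySem.List.sorted2, PySem.List.sorted, if_neg (by decide : ¬(false = true))]
  have hfun : (fun a b => decide (k1 a < k1 b) || (!decide (k1 b < k1 a) && decide (k2 a < k2 b)))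
      = (fun a b => decide ((toLex (k1 a, k2 a) : Lex (κ₁ × κ₂)) < toLex (k1 b, k2 b))) := by
    funext a b
    have : ((toLex (k1 a, k2 a) : Lex (κ₁ × κ₂)) < toLex (k1 b, k2 b))
        ↔ (k1 a < k1 b ∨ (k1 a = k1 b ∧ k2 a < k2 b)) := Prod.Lex.lt_iff
    rw [decide_eq_decide.2 this]
    rcases lt_trichotomy (k1 a) (k1 b) with h | h | h
    · simp [h]
    · simp [h]
    · simp [h, not_lt_of_gt h, ne_of_gt h]
    · infer_instance
  rw [hfun]

-- the distinct elements in first-occurrence order have strictly increasing first indices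
theorem pv_ofList_pairwise_idx {α : Type} [BEq α] [LawfulBEq α] (L : List α) :
    (PySem.Set.ofList L).Pairwise
      (fun a b => ((PySem.List.index? L a).getD 0) < ((PySem.List.index? L b).getD 0)) := by
  induction L using List.reverseRecOn with
  | nil => simp [PySem.Set.ofList, PySem.Set.empty]
  | append_singleton L x ih =>
    have hidx : ∀ a ∈ PySem.Set.ofList L, PySem.List.index? (L ++ [x]) a = PySem.List.index? L a :=
      fun a ha => PySem.List.index?_append_of_mem [x] ((PySem.Set.mem_ofList L a).1 ha)
    have hofl : PySem.Set.ofList (L ++ [x]) = PySem.Set.add (PySem.Set.ofList L) x := by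
      simp [PySem.Set.ofList, List.foldl_append]
    rw [hofl]
    by_cases hx : x ∈ L
    · have hc : (PySem.Set.ofList L).contains x = true := by
        simp [PySem.Set.mem_ofList, hx]
      rw [PySem.Set.add, if_pos hc]
      exact ih.imp_of_mem (fun {a b} ha hb h => by rwa [hidx a ha, hidx b hb])
    · have hc : (PySem.Set.ofList L).contains x = false := by
        simp [PySem.Set.mem_ofList, hx]
      rw [PySem.Set.add, if_neg (by simp [PySem.Set.mem_ofList]; exact hx)]
      rw [List.pairwise_append]
      refine ⟨ih.imp_of_mem (fun {a b} ha hb h => by rwa [hidx a ha, hidx b hb]),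
        List.pairwise_singleton _ _, ?_⟩
      intro a ha b hb
      rw [List.mem_singleton] at hb
      subst hb
      rw [hidx a ha, PySem.List.index?_append_singleton_self L b hx]
      have haL : a ∈ L := (PySem.Set.mem_ofList L a).1 ha
      have hsome : (PySem.List.index? L a).isSome = true := (PySem.List.index?_isSome_iff L a).2 haL
      rcases Option.isSome_iff_exists.1 hsome with ⟨k, hk⟩
      rcases PySem.List.getElem_of_index?_eq_some hk with ⟨hklt, -, -⟩
      rw [hk]
      simpa using hklt

theorem pv_flatMap_if_none {α β : Type} [DecidableEq α] (l : List α) (q0 : α) (g : α → List β)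
    (h : q0 ∉ l) : (l.flatMap (fun q => if q = q0 then g q else [])) = [] := by
  induction l with
  | nil => rfl
  | cons a l ih =>
    rw [List.flatMap_cons, if_neg (by rintro rfl; exact h (List.mem_cons_self)), List.nil_append]
    exact ih (fun hc => h (List.mem_cons_of_mem a hc))

theorem pv_flatMap_if_single {α β : Type} [DecidableEq α] (l : List α) (q0 : α) (g : α → List β)
    (hnd : l.Nodup) (hm : q0 ∈ l) :
    (l.flatMap (fun q => if q = q0 then g q else [])) = g q0 := by
  induction l with
  | nil => simp at hm
  | cons a l ih =>
    rcases List.nodup_cons.1 hnd with ⟨hal, hl⟩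
    rw [List.flatMap_cons]
    by_cases ha : a = q0
    · subst ha
      rw [if_pos rfl, pv_flatMap_if_none l a g hal, List.append_nil]
    · rw [if_neg ha, List.nil_append]
      exact ih hl ((List.mem_cons.1 hm).resolve_left (fun h => ha h.symm))

-- first index is injective on the questions that occur
theorem pv_fidx_inj (ann : List (String × String)) (a b : String)
    (ha : a ∈ ann.map (fun p => p.2)) (hb : b ∈ ann.map (fun p => p.2))
    (h : pvFidx ann a = pvFidx ann b) : a = b := by
  set L := ann.map (fun p => p.2) with hL
  rcases Option.isSome_iff_exists.1 ((PySem.List.index?_isSome_iff L a).2 ha) with ⟨i, hi⟩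
  rcases Option.isSome_iff_exists.1 ((PySem.List.index?_isSome_iff L b).2 hb) with ⟨j, hj⟩
  have hij : i = j := by
    have := h
    unfold pvFidx at this
    rw [← hL, hi, hj] at this
    simpa using this
  rcases PySem.List.getElem_of_index?_eq_some hi with ⟨hilt, hia, -⟩
  rcases PySem.List.getElem_of_index?_eq_some hj with ⟨hjlt, hjb, -⟩
  subst hij
  rw [← hia, ← hjb]

-- the first-seen-index fold of B, characterized by index? into the question list
theorem pv_first_getD (xs : List (String × String)) :
    ∀ (s : Int) (d : PySem.Dict String Int) (q : String),
      ((PySem.List.enumerate xs s).foldl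
          (fun d ip => if d.contains ip.2.2 then d else d.insert ip.2.2 ip.1) d).getD q 0
        = if d.contains q then d.getD q 0
          else (match PySem.List.index? (xs.map (fun p => p.2)) q with
                | some i => s + (i : Int)
                | none => d.getD q 0) := by
  induction xs with
  | nil =>
    intro s d q
    simp [PySem.List.enumerate, PySem.List.index?]
  | cons p xs ih =>
    intro s d q
    rw [PySem.List.enumerate_cons, List.foldl_cons]
    by_cases hc : d.contains p.2 = true
    · rw [if_pos hc, ih (s + 1) d q]
      by_cases hdq : d.contains q = true
      · rw [if_pos hdq, if_pos hdq]
      · rw [if_neg hdq, if_neg hdq]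
        have hqp : q ≠ p.2 := fun h => hdq (h ▸ hc)
        rw [List.map_cons, PySem.List.index?_cons_of_ne _ (Ne.symm hqp)]
        cases h : PySem.List.index? (xs.map (fun p => p.2)) q with
        | none => simp
        | some i => push_cast; simp; ring
    · rw [if_neg hc, ih (s + 1) (d.insert p.2 s) q]
      by_cases hq : q = p.2
      · subst hq
        rw [if_pos (PySem.Dict.contains_insert_self d p.2 s), PySem.Dict.getD_insert_self,
          if_neg hc, List.map_cons, PySem.List.index?_cons_self]
        simp
      · have hci : (d.insert p.2 s).contains q = d.contains q := by
          rw [PySem.Dict.contains_insert]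
          simp [hq]
        have hgi : (d.insert p.2 s).getD q 0 = d.getD q 0 :=
          PySem.Dict.getD_insert_of_ne d s 0 hq
        rw [hci, hgi, List.map_cons, PySem.List.index?_cons_of_ne _ (Ne.symm hq)]
        by_cases hdq : d.contains q = true
        · rw [if_pos hdq, if_pos hdq]
        · rw [if_neg hdq, if_neg hdq]
          cases h : PySem.List.index? (xs.map (fun p => p.2)) q with
          | none => simp
          | some i => push_cast; simp; ring

-- ===== A reduces to the grouped form pvT =====
theorem pv_A_eq_T (ann : List (String × String)) :
    sort_by_questions_occurences ann = pvT ann := by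
  unfold sort_by_questions_occurences
  -- the grouping loop is a modify-loop
  have hstep : ann.foldl (fun (d : PySem.Dict String (List String)) p =>
        let d := if d.contains p.2 then d else d.insert p.2 []
        d.modify p.2 [] (fun v => v ++ [p.1])) PySem.Dict.empty
      = ann.foldl (fun (d : PySem.Dict String (List String)) p =>
          d.modify p.2 [] (fun v => v ++ [p.1])) PySem.Dict.empty := by
    refine PySem.List.foldl_congr_mem _ _ _ _ (fun d p _ => ?_)
    by_cases hc : d.contains p.2 = true
    · simp only [hc, if_true]
    · simp only [hc, if_false, Bool.false_eq_true]
      show (d.insert p.2 []).modify p.2 [] (fun v => v ++ [p.1])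
          = d.modify p.2 [] (fun v => v ++ [p.1])
      unfold PySem.Dict.modify
      rw [PySem.Dict.getD_insert_self, PySem.Dict.insert_insert_self,
        PySem.Dict.getD_of_not_contains d [] (by simpa using hc)]
  show ((PySem.List.sorted
        (ann.foldl (fun (d : PySem.Dict String (List String)) p =>
          let d := if d.contains p.2 then d else d.insert p.2 []
          d.modify p.2 [] (fun v => v ++ [p.1])) PySem.Dict.empty).items
        (fun item => PySem.List.len item.2) false).foldl
      (fun (d : PySem.Dict String (List String)) p => d.insert p.1 p.2)
      PySem.Dict.empty).items.foldl
    (fun acc p => p.2.foldl (fun acc c => acc ++ [(c, p.1)]) acc) [] = pvT ann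
  rw [hstep]
  set d1 := ann.foldl (fun (d : PySem.Dict String (List String)) p =>
      d.modify p.2 [] (fun v => v ++ [p.1])) PySem.Dict.empty with hd1
  have hkeys : d1.keys = pvQs ann := by
    rw [hd1, PySem.Dict.keys_foldl_modify_key ann (fun p => p.2) [] (fun _ p v => v ++ [p.1])
      PySem.Dict.empty]
    simp [PySem.Dict.keys_empty, PySem.Set.update_nil_left, pvQs]
  have hnd : d1.keys.Nodup := by
    rw [hd1]
    exact PySem.Dict.nodup_keys_foldl_modify_key ann (fun p => p.2) [] (fun _ p v => v ++ [p.1])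
      PySem.Dict.empty (by simp [PySem.Dict.keys_empty])
  have hgd : ∀ q, d1.getD q [] = pvCtx ann q := by
    intro q
    have h1 : (ann.map Prod.swap).foldl
          (fun (d : PySem.Dict String (List String)) p => d.modify p.1 [] (fun v => v ++ [p.2]))
          PySem.Dict.empty = d1 := by
      rw [List.foldl_map]; rfl
    rw [← h1, PySem.Dict.getD_foldl_modify_append]
    rw [PySem.Dict.getD_empty, List.nil_append, List.filter_map]
    simp only [List.map_map]
    unfold pvCtx
    congr 1
  have hitems : d1.items = (pvQs ann).map (fun q => (q, pvCtx ann q)) := by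
    rw [PySem.Dict.items_eq_map_keys d1 hnd [], hkeys]
    exact List.map_congr_left (fun q _ => by rw [hgd q])
  rw [hitems, pv_sorted_map (fun q => (q, pvCtx ann q)) (fun item => PySem.List.len item.2)
    (pvQs ann)]
  have hkey : (fun q => PySem.List.len (pvCtx ann q)) = (fun q => pvCnt ann q) := by
    funext q
    simp only [PySem.List.len, pvCtx, pvCnt, List.length_map, List.count_eq_countP,
      List.countP_map]
    rw [← List.countP_eq_length_filter]
    rfl
  rw [hkey]
  set S := PySem.List.sorted (pvQs ann) (fun q => pvCnt ann q) false with hS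
  have hSnodup : (S.map (fun q => (q, pvCtx ann q))).map (fun p => p.1) |>.Nodup := by
    rw [List.map_map]
    have : ((fun p : String × List String => p.1) ∘ (fun q => (q, pvCtx ann q))) = id := rfl
    rw [this, List.map_id]
    exact ((PySem.List.sorted_perm (pvQs ann) (fun q => pvCnt ann q) false).symm).nodup
      (PySem.Set.nodup_ofList _)
  have hitems2 : ((S.map (fun q => (q, pvCtx ann q))).foldl
        (fun (d : PySem.Dict String (List String)) p => d.insert p.1 p.2)
        PySem.Dict.empty).items
      = S.map (fun q => (q, pvCtx ann q)) := by
    rw [PySem.Dict.items_foldl_insert_fresh (S.map (fun q => (q, pvCtx ann q)))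
      (fun p => p.1) (fun p => p.2) PySem.Dict.empty (fun a _ => by simp) hSnodup]
    rw [show PySem.Dict.empty.items = ([] : List (String × List String)) from rfl,
      List.nil_append]
    exact (List.map_congr_left (fun a _ => rfl)).trans (List.map_id _)
  rw [hitems2]
  -- flatten the nested append loops
  have hinner : ∀ (p : String × List String) (acc : List (String × String)),
      p.2.foldl (fun acc c => acc ++ [(c, p.1)]) acc = acc ++ p.2.map (fun c => (c, p.1)) :=
    fun p acc => PySem.List.foldl_append_singleton_eq_map (fun c => (c, p.1)) p.2 acc
  calc (S.map (fun q => (q, pvCtx ann q))).foldl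
        (fun acc p => p.2.foldl (fun acc c => acc ++ [(c, p.1)]) acc) []
      = (S.map (fun q => (q, pvCtx ann q))).foldl
        (fun acc p => acc ++ p.2.map (fun c => (c, p.1))) [] :=
        PySem.List.foldl_congr_mem _ _ _ _ (fun acc p _ => hinner p acc)
    _ = (S.map (fun q => (q, pvCtx ann q))).flatMap (fun p => p.2.map (fun c => (c, p.1))) := by
        rw [PySem.List.foldl_append_eq_flatMap]; rfl
    _ = S.flatMap (fun q => (pvCtx ann q).map (fun c => (c, q))) := by
        rw [List.flatMap_map]
    _ = S.flatMap (pvGrp ann) := by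
        refine List.flatMap_congr (fun q _ => ?_)
        unfold pvCtx pvGrp
        rw [List.map_map]
        refine (List.map_congr_left (fun p hp => ?_)).trans (List.map_id _)
        rcases List.mem_filter.1 hp with ⟨-, hpq⟩
        have hq : p.2 = q := by simpa using hpq
        show (p.1, q) = p
        rw [← hq]
    _ = pvT ann := rfl

-- ===== B is the stable sort by the lexicographic key =====
theorem pv_B_eq_sorted (ann : List (String × String)) :
    sort_by_questions_occurences_alt ann = PySem.List.sorted ann (pvKey ann) false := by
  have hcnt : ∀ q : String,
      ((PySem.List.enumerate ann 0).foldl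
        (fun (d : PySem.Dict String Int) (ip : Int × (String × String)) =>
          d.insert ip.2.2 (d.getD ip.2.2 0 + 1))
        PySem.Dict.empty).getD q 0 = pvCnt ann q := by
    intro q
    have h1 : (PySem.List.enumerate ann 0).foldl
          (fun (d : PySem.Dict String Int) (ip : Int × (String × String)) =>
            d.insert ip.2.2 (d.getD ip.2.2 0 + 1))
          PySem.Dict.empty
        = (((PySem.List.enumerate ann 0).map (fun ip => ip.2)).map (fun p => p.2)).foldl
            (fun (d : PySem.Dict String Int) x => d.insert x (d.getD x 0 + 1))
            PySem.Dict.empty := by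
      rw [List.foldl_map, List.foldl_map]
    rw [h1, PySem.List.map_snd_enumerate, PySem.Dict.getD_foldl_insert_add_one]
    simp [pvCnt]
  have hfst : ∀ q : String,
      ((PySem.List.enumerate ann 0).foldl
        (fun (d : PySem.Dict String Int) (ip : Int × (String × String)) =>
          if d.contains ip.2.2 then d else d.insert ip.2.2 ip.1)
        PySem.Dict.empty).getD q 0 = pvFidx ann q := by
    intro q
    rw [pv_first_getD ann 0 PySem.Dict.empty q, if_neg (by simp)]
    unfold pvFidx
    cases h : PySem.List.index? (ann.map (fun p => p.2)) q with
    | none => simp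
    | some i => simp
  have hsplit : (PySem.List.enumerate ann 0).foldl
      (fun (st : PySem.Dict String Int × PySem.Dict String Int) ip =>
        (st.1.insert ip.2.2 (st.1.getD ip.2.2 0 + 1),
         if st.2.contains ip.2.2 then st.2 else st.2.insert ip.2.2 ip.1))
      (PySem.Dict.empty, PySem.Dict.empty)
    = ((PySem.List.enumerate ann 0).foldl
        (fun (d : PySem.Dict String Int) (ip : Int × (String × String)) =>
          d.insert ip.2.2 (d.getD ip.2.2 0 + 1)) PySem.Dict.empty,
       (PySem.List.enumerate ann 0).foldl
        (fun (d : PySem.Dict String Int) (ip : Int × (String × String)) =>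
          if d.contains ip.2.2 then d else d.insert ip.2.2 ip.1) PySem.Dict.empty) :=
    PySem.List.foldl_prod_mk
      (fun (d : PySem.Dict String Int) (ip : Int × (String × String)) =>
        d.insert ip.2.2 (d.getD ip.2.2 0 + 1))
      (fun (d : PySem.Dict String Int) (ip : Int × (String × String)) =>
        if d.contains ip.2.2 then d else d.insert ip.2.2 ip.1)
      (PySem.List.enumerate ann 0) PySem.Dict.empty PySem.Dict.empty
  show PySem.List.sorted2 ann
      (fun p => ((PySem.List.enumerate ann 0).foldl
        (fun (st : PySem.Dict String Int × PySem.Dict String Int) ip =>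
          (st.1.insert ip.2.2 (st.1.getD ip.2.2 0 + 1),
           if st.2.contains ip.2.2 then st.2 else st.2.insert ip.2.2 ip.1))
        (PySem.Dict.empty, PySem.Dict.empty)).1.getD p.2 0)
      (fun p => ((PySem.List.enumerate ann 0).foldl
        (fun (st : PySem.Dict String Int × PySem.Dict String Int) ip =>
          (st.1.insert ip.2.2 (st.1.getD ip.2.2 0 + 1),
           if st.2.contains ip.2.2 then st.2 else st.2.insert ip.2.2 ip.1))
        (PySem.Dict.empty, PySem.Dict.empty)).2.getD p.2 0) false
    = PySem.List.sorted ann (pvKey ann) false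
  have hk1 : (fun p : String × String => ((PySem.List.enumerate ann 0).foldl
        (fun (st : PySem.Dict String Int × PySem.Dict String Int) ip =>
          (st.1.insert ip.2.2 (st.1.getD ip.2.2 0 + 1),
           if st.2.contains ip.2.2 then st.2 else st.2.insert ip.2.2 ip.1))
        (PySem.Dict.empty, PySem.Dict.empty)).1.getD p.2 0)
      = (fun p : String × String => pvCnt ann p.2) :=
    funext fun p => by rw [hsplit]; exact hcnt p.2
  have hk2 : (fun p : String × String => ((PySem.List.enumerate ann 0).foldl
        (fun (st : PySem.Dict String Int × PySem.Dict String Int) ip =>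
          (st.1.insert ip.2.2 (st.1.getD ip.2.2 0 + 1),
           if st.2.contains ip.2.2 then st.2 else st.2.insert ip.2.2 ip.1))
        (PySem.Dict.empty, PySem.Dict.empty)).2.getD p.2 0)
      = (fun p : String × String => pvFidx ann p.2) :=
    funext fun p => by rw [hsplit]; exact hfst p.2
  rw [hk1, hk2, pv_sorted2_eq_lex]
  rfl

-- ===== pvT is key-nondecreasing and filter-preserving, hence equals B's sort =====
-- every element of the group of q carries the group key
theorem pv_key_grp (ann : List (String × String)) (q : String) (x : String × String)
    (hx : x ∈ pvGrp ann q) : pvKey ann x = toLex (pvCnt ann q, pvFidx ann q) := by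
  unfold pvGrp at hx
  rcases List.mem_filter.1 hx with ⟨-, h⟩
  have hq : x.2 = q := by simpa using h
  unfold pvKey
  rw [hq]

theorem pv_T_pairwise (ann : List (String × String)) :
    (pvT ann).Pairwise (fun a b => pvKey ann a ≤ pvKey ann b) := by
  have hsec : (pvQs ann).Pairwise (fun a b => pvFidx ann a < pvFidx ann b) := by
    have h := pv_ofList_pairwise_idx (ann.map (fun p => p.2))
    exact h.imp (fun {a b} hab => by unfold pvFidx; exact_mod_cast hab)
  have hP := pv_sorted_pairwise_sec (fun q => pvCnt ann q) (fun q => pvFidx ann q)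
    (pvQs ann) hsec
  unfold pvT
  rw [List.pairwise_flatMap]
  constructor
  · intro q _
    refine List.pairwise_of_forall_mem_list (fun a ha b hb => ?_)
    rw [pv_key_grp ann q a ha, pv_key_grp ann q b hb]
  · refine hP.imp_of_mem (fun {q1 q2} _ _ h => ?_)
    intro x hx y hy
    rw [pv_key_grp ann q1 x hx, pv_key_grp ann q2 y hy]
    refine le_of_lt ?_
    rw [Prod.Lex.lt_iff]
    simpa using h

theorem pv_T_filter (ann : List (String × String)) (k : Lex (Int × Int)) :
    (pvT ann).filter (fun x => decide (pvKey ann x = k))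
      = ann.filter (fun x => decide (pvKey ann x = k)) := by
  have hmemQ : ∀ x ∈ ann, x.2 ∈ pvQs ann :=
    fun x hx => (PySem.Set.mem_ofList _ _).2 (List.mem_map_of_mem hx)
  unfold pvT
  rw [List.filter_flatMap]
  have hfun : (fun q => (pvGrp ann q).filter (fun x => decide (pvKey ann x = k)))
      = (fun q => if toLex (pvCnt ann q, pvFidx ann q) = k then pvGrp ann q else []) := by
    funext q
    by_cases hq : toLex (pvCnt ann q, pvFidx ann q) = k
    · rw [if_pos hq]
      refine (List.filter_congr (fun x hx => ?_)).trans (List.filter_true _)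
      simp [pv_key_grp ann q x hx, hq]
    · rw [if_neg hq]
      refine List.filter_eq_nil_iff.2 (fun x hx => ?_)
      simp [pv_key_grp ann q x hx, hq]
  rw [hfun]
  by_cases hex : ∃ q0, q0 ∈ pvQs ann ∧ toLex (pvCnt ann q0, pvFidx ann q0) = k
  · obtain ⟨q0, hq0m, hq0k⟩ := hex
    have huniq : ∀ q ∈ pvQs ann, toLex (pvCnt ann q, pvFidx ann q) = k → q = q0 := by
      intro q hqm hqk
      have h2 : (pvCnt ann q, pvFidx ann q) = (pvCnt ann q0, pvFidx ann q0) :=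
        toLex_inj.1 (hqk.trans hq0k.symm)
      exact pv_fidx_inj ann q q0 ((PySem.Set.mem_ofList _ _).1 hqm)
        ((PySem.Set.mem_ofList _ _).1 hq0m) (congrArg Prod.snd h2)
    have hcong : ∀ q ∈ PySem.List.sorted (pvQs ann) (fun q => pvCnt ann q) false,
        (if toLex (pvCnt ann q, pvFidx ann q) = k then pvGrp ann q else [])
          = (if q = q0 then pvGrp ann q else []) := by
      intro q hq
      have hqm : q ∈ pvQs ann := (PySem.List.mem_sorted _ _ _ q).1 hq
      by_cases h : q = q0
      · subst h
        rw [if_pos hq0k, if_pos rfl]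
      · rw [if_neg h, if_neg (fun hk' => h (huniq q hqm hk'))]
    have hnodup : (PySem.List.sorted (pvQs ann) (fun q => pvCnt ann q) false).Nodup :=
      ((PySem.List.sorted_perm (pvQs ann) (fun q => pvCnt ann q) false).symm).nodup
        (by unfold pvQs; exact PySem.Set.nodup_ofList _)
    have hmem0 : q0 ∈ PySem.List.sorted (pvQs ann) (fun q => pvCnt ann q) false :=
      (PySem.List.mem_sorted _ _ _ q0).2 hq0m
    rw [List.flatMap_congr hcong,
      pv_flatMap_if_single (PySem.List.sorted (pvQs ann) (fun q => pvCnt ann q) false)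
        q0 (pvGrp ann) hnodup hmem0]
    refine (List.filter_congr (fun x hx => ?_)).symm
    by_cases h : x.2 = q0
    · simp [pvKey, h, hq0k]
    · have hne : pvKey ann x ≠ k :=
        fun hk' => h (huniq x.2 (hmemQ x hx) (by simpa [pvKey] using hk'))
      simp [hne, h]
  · push Not at hex
    rw [List.flatMap_eq_nil_iff.2 (fun q hq => by
        rw [if_neg (hex q ((PySem.List.mem_sorted _ _ _ q).1 hq))]),
      List.filter_eq_nil_iff.2 (fun x hx => by
        simpa [pvKey] using hex x.2 (hmemQ x hx))]

-- ===== VERDICT (by name: the statement is the Claim_ definition above) =====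
theorem sort_by_questions_occurences_spec : Claim_equal_sort_by_questions_occurences := by
  intro ann _
  unfold Spec_sort_by_questions_occurences
  rw [pv_A_eq_T, pv_B_eq_sorted]
  exact (pv_stable_unique (pvKey ann) (pvT ann) _ (pv_T_pairwise ann)
    (PySem.List.sorted_pairwise ann (pvKey ann))
    (fun k => by rw [pv_T_filter, pv_sorted_filter]))
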